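-- pv_equiv track=rewrite | github.com/JaamayaG/HANDERS | parser.py | choose_triplet
-- ===== SOURCE A (Python) =====
-- from typing import Dict, List, Optional, Tuple
--
-- def choose_triplet(values: List[int], max_value: int) -> Optional[Tuple[int, int, int]]:
--     if len(values) < 3:
--         return None
--     # Use the first valid triplet in order to keep OCR ordering intact.
--     for i in range(len(values) - 2):
--         a, b, c = values[i : i + 3]
--         if all(0 <= v <= max_value for v in (a, b, c)):
--             return a, b, c
--     return None
-- ===== SOURCE B (Python) =====
-- from typing import Dict, List, Optional, Tuple
--
-- def choose_triplet(values: List[int], max_value: int) -> Optional[Tuple[int, int, int]]: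
--     # One pass: count consecutive in-range values; return the moment the run reaches 3.
--     run = 0
--     p2 = p1 = 0
--     for v in values:
--         if 0 <= v <= max_value:
--             run += 1
--             if run >= 3:
--                 return (p2, p1, v)
--             p2, p1 = p1, v
--         else:
--             run = 0
--     return None
-- ===== Notes on version B (the rewrite author's own statement) =====
-- stated objective: alternative
-- what changed: Replaced the overlapping-window scan (allocating and re-testing the slice values[i:i+3] at every index) by a single pass that maintains a run-length counter of consecutive in-range values together with the previous two values, returning when the run reaches 3.
import Mathlib
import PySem

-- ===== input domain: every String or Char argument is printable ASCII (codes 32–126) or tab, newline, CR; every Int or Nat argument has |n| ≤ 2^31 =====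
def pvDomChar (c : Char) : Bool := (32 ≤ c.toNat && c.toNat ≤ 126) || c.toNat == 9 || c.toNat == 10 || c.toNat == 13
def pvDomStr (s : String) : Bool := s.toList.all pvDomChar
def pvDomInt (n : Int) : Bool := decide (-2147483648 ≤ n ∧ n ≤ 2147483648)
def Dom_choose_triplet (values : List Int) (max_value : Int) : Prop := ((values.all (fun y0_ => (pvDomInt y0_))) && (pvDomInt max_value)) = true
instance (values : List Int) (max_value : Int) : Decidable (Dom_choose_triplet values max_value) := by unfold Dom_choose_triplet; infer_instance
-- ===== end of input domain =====

-- B replaces A's overlapping-window scan by a single pass maintaining a run-length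
-- counter of consecutive in-range values (alternative decomposition, same O(n) cost).


-- ===== PORT A =====
-- loop 'for i in range(len(values) - 2)' over the remaining index list
def chooseGo (values : List Int) (max_value : Int) : List Int → Option (Int × Int × Int)
  | [] => none
  | i :: rest =>
    -- a, b, c = values[i : i + 3]
    match PySem.List.slice values (some i) (some (i + 3)) with
    | [a, b, c] =>
      if (0 ≤ a ∧ a ≤ max_value) ∧ (0 ≤ b ∧ b ≤ max_value) ∧ (0 ≤ c ∧ c ≤ max_value)
      then some (a, b, c)
      else chooseGo values max_value rest
    | _ => none  -- unreachable for indices produced by range(len-2): the slice has 3 elements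

def choose_triplet (values : List Int) (max_value : Int) : Option (Int × Int × Int) :=
  if (values.length : Int) < 3 then none
  else chooseGo values max_value (PySem.List.pyRange 0 ((values.length : Int) - 2) 1)

-- ===== PORT B =====
-- single pass: run = length of current run of in-range values, p2/p1 = previous two values
def altGo (max_value : Int) : List Int → Nat → Int → Int → Option (Int × Int × Int)
  | [], _, _, _ => none
  | v :: rest, run, p2, p1 =>
    if 0 ≤ v ∧ v ≤ max_value then
      if run + 1 ≥ 3 then some (p2, p1, v)
      else altGo max_value rest (run + 1) p1 v
    else altGo max_value rest 0 p2 p1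

def choose_triplet_alt (values : List Int) (max_value : Int) : Option (Int × Int × Int) :=
  altGo max_value values 0 0 0

-- ===== PRECONDITION & SPEC =====
def Spec_choose_triplet (values : List Int) (max_value : Int) (out : Option (Int × Int × Int)) : Prop := out = choose_triplet_alt values max_value
instance (values : List Int) (max_value : Int) (out : Option (Int × Int × Int)) : Decidable (Spec_choose_triplet values max_value out) := by unfold Spec_choose_triplet; infer_instance

-- ===== CLAIM (what is proved, stated in full; the proofs are below) =====
def Claim_equal_choose_triplet : Prop := ∀ (values : List Int) (max_value : Int), Dom_choose_triplet values max_value → Spec_choose_triplet values max_value (choose_triplet values max_value)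

-- ===== LEMMAS AND PROOFS =====

-- reference function: first window of 3 consecutive in-range values
def winF (m : Int) : List Int → Option (Int × Int × Int)
  | a :: b :: c :: t =>
    if (0 ≤ a ∧ a ≤ m) ∧ (0 ≤ b ∧ b ≤ m) ∧ (0 ≤ c ∧ c ≤ m)
    then some (a, b, c)
    else winF m (b :: c :: t)
  | _ => none

lemma winF_short (m : Int) (l : List Int) (h : l.length < 3) : winF m l = none := by
  match l with
  | [] => rfl
  | [_] => rfl
  | [_, _] => rfl
  | a :: b :: c :: t => simp at h; omega

lemma winF_skip1 (m a : Int) (l : List Int) (ha : ¬ (0 ≤ a ∧ a ≤ m)) :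
    winF m (a :: l) = winF m l := by
  match l with
  | [] => rfl
  | [_] => rfl
  | b :: c :: t => simp only [winF]; rw [if_neg]; tauto

lemma winF_skip2 (m a b : Int) (l : List Int) (hb : ¬ (0 ≤ b ∧ b ≤ m)) :
    winF m (a :: b :: l) = winF m l := by
  match l with
  | [] => rfl
  | c :: t =>
    simp only [winF]
    rw [if_neg (by tauto)]
    exact winF_skip1 m b (c :: t) hb

lemma exists3 (l : List Int) (h : 3 ≤ l.length) :
    ∃ a b c t, l = a :: b :: c :: t := by
  match l with
  | a :: b :: c :: t => exact ⟨a, b, c, t, rfl⟩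
  | [] => simp at h
  | [_] => simp at h
  | [_, _] => simp at h

-- invariant for B's single pass
lemma altGo_winF (m : Int) (l : List Int) : ∀ (run : Nat) (p2 p1 : Int),
    (run = 0 → altGo m l run p2 p1 = winF m l) ∧
    (run = 1 → (0 ≤ p1 ∧ p1 ≤ m) → altGo m l run p2 p1 = winF m (p1 :: l)) ∧
    (2 ≤ run → (0 ≤ p2 ∧ p2 ≤ m) → (0 ≤ p1 ∧ p1 ≤ m) →
      altGo m l run p2 p1 = winF m (p2 :: p1 :: l)) := by
  induction l with
  | nil =>
    intro run p2 p1
    refine ⟨fun _ => rfl, fun _ _ => rfl, fun _ _ _ => ?_⟩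
    simp [altGo, winF]
  | cons v rest ih =>
    intro run p2 p1
    refine ⟨?_, ?_, ?_⟩
    · intro h0
      subst h0
      by_cases hv : 0 ≤ v ∧ v ≤ m
      · simp only [altGo, if_pos hv]
        rw [if_neg (by omega)]
        exact (ih 1 p1 v).2.1 rfl hv
      · simp only [altGo, if_neg hv]
        rw [(ih 0 p2 p1).1 rfl, winF_skip1 m v rest hv]
    · intro h1 hp1
      subst h1
      by_cases hv : 0 ≤ v ∧ v ≤ m
      · simp only [altGo, if_pos hv]
        rw [if_neg (by omega)]
        exact (ih 2 p1 v).2.2 (by omega) hp1 hv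
      · simp only [altGo, if_neg hv]
        rw [(ih 0 p2 p1).1 rfl, winF_skip2 m p1 v rest hv]
    · intro h2 hp2 hp1
      by_cases hv : 0 ≤ v ∧ v ≤ m
      · simp only [altGo, if_pos hv]
        rw [if_pos (by omega)]
        simp only [winF]
        rw [if_pos ⟨hp2, hp1, hv⟩]
      · simp only [altGo, if_neg hv]
        rw [(ih 0 p2 p1).1 rfl]
        have hstep : winF m (p2 :: p1 :: v :: rest)
            = if (0 ≤ p2 ∧ p2 ≤ m) ∧ (0 ≤ p1 ∧ p1 ≤ m) ∧ (0 ≤ v ∧ v ≤ m)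
              then some (p2, p1, v) else winF m (p1 :: v :: rest) := rfl
        rw [hstep, if_neg (by tauto), winF_skip2 m p1 v rest hv]

lemma alt_eq_winF (values : List Int) (m : Int) :
    choose_triplet_alt values m = winF m values :=
  (altGo_winF m values 0 0 0).1 rfl

-- invariant for A's window scan
lemma chooseGo_winF (values : List Int) (m : Int) (hlen : 3 ≤ values.length) :
    ∀ (d i : Nat), i + d = values.length - 2 →
      chooseGo values m (PySem.List.pyRange (i : Int) ((values.length : Int) - 2) 1)
        = winF m (values.drop i) := by
  intro d
  induction d with
  | zero =>
    intro i hi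
    have he : ((values.length : Int) - 2) = (i : Int) := by omega
    rw [he, PySem.List.pyRange_one_eq_nil (le_refl _)]
    rw [winF_short m _ (by simp; omega)]
    rfl
  | succ d ihd =>
    intro i hi
    have hlt : (i : Int) < (values.length : Int) - 2 := by omega
    rw [PySem.List.pyRange_one_cons hlt]
    have h3 : 3 ≤ (values.drop i).length := by simp; omega
    obtain ⟨a, b, c, t, habc⟩ := exists3 _ h3
    have hslice : PySem.List.slice values (some (i : Int)) (some ((i : Int) + 3))
        = [a, b, c] := by
      have : ((i : Int) + 3) = ((i + 3 : Nat) : Int) := by push_cast; ring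
      rw [this, PySem.List.slice_natCast]
      have : (i + 3) - i = 3 := by omega
      rw [this, habc]
      rfl
    have hdrop1 : values.drop (i + 1) = b :: c :: t := by
      have : values.drop (i + 1) = (values.drop i).drop 1 := by
        rw [List.drop_drop]
      rw [this, habc]; rfl
    simp only [chooseGo, hslice]
    rw [habc]
    simp only [winF]
    by_cases hc : (0 ≤ a ∧ a ≤ m) ∧ (0 ≤ b ∧ b ≤ m) ∧ (0 ≤ c ∧ c ≤ m)
    · rw [if_pos hc, if_pos hc]
    · rw [if_neg hc, if_neg hc]
      have : ((i : Int) + 1) = ((i + 1 : Nat) : Int) := by push_cast; ring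
      rw [this, ihd (i + 1) (by omega), hdrop1]

lemma a_eq_winF (values : List Int) (m : Int) :
    choose_triplet values m = winF m values := by
  unfold choose_triplet
  by_cases h : (values.length : Int) < 3
  · rw [if_pos h, winF_short m values (by omega)]
  · rw [if_neg h]
    have h3 : 3 ≤ values.length := by omega
    have := chooseGo_winF values m h3 (values.length - 2) 0 (by omega)
    simpa using this

-- ===== VERDICT (by name: the statement is the Claim_ definition above) =====
theorem choose_triplet_spec : Claim_equal_choose_triplet := by
  intro values max_value _
  unfold Spec_choose_triplet
  rw [a_eq_winF, alt_eq_winF]
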